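-- pv_equiv track=rewrite | github.com/Drozdova-Daria/intelligent_placer | intelligent_placer_lib/intelligent_placer.py | classify_objects
-- ===== SOURCE A (Python) =====
-- def classify_objects(objects_contours):
--     """
--     Divides objects into figure and objects
--     :param objects_contours: array of objects contours
--     :return: figure, objects
--     """
--     figure = 0
--     min_coordinate = objects_contours[0][0][0]
--
--     for i in range(len(objects_contours)):
--         for point in objects_contours[i]:
--             if point[0] < min_coordinate:
--                 figure = i
--                 min_coordinate = point[0]
--
--     return objects_contours[figure], objects_contours[:figure] + objects_contours[figure + 1:]
-- ===== SOURCE B (Python) =====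
-- def classify_objects(objects_contours):
--     """
--     Divides objects into figure and objects
--     :param objects_contours: array of objects contours
--     :return: figure, objects
--     """
--     order = sorted((i for i, contour in enumerate(objects_contours) if contour),
--                    key=lambda i: min(point[0] for point in objects_contours[i]))
--     figure = order[0]
--     return objects_contours[figure], objects_contours[:figure] + objects_contours[figure + 1:]
-- ===== Notes on version B (the rewrite author's own statement) =====
-- stated objective: alternative
-- what changed: Replaces the flat running min-with-index scan over all points by sort-then-pick: stably sort the indices of the nonempty contours by their contour's minimum x-coordinate and take the first, stability breaking ties toward the earliest index.
import Mathlib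
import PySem

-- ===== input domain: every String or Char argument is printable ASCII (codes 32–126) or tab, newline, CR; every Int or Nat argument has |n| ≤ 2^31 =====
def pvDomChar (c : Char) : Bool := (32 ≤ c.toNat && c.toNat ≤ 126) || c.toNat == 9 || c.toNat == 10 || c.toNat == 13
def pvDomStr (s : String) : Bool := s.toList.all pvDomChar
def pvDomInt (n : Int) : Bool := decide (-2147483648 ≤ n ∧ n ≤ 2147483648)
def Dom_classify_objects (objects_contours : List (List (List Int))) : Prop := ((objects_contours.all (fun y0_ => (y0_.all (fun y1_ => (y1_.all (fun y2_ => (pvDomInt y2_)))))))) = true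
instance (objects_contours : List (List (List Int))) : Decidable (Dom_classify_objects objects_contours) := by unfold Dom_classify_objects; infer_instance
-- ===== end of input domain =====

-- B replaces A's flat running min-with-index over all points by sort-then-pick: stably sort the
-- nonempty-contour indices by per-contour minimum x and take the first (objective: alternative);
-- return values proved equal on Pre_.


-- ===== PORT A =====
def classify_objects (objects_contours : List (List (List Int))) : List (List Int) × List (List (List Int)) :=
  -- figure = 0; min_coordinate = objects_contours[0][0][0]  (indexing exact via pyGetD; Pre_ keeps it in range)
  let min_coordinate : Int :=
    PySem.List.pyGetD (PySem.List.pyGetD (PySem.List.pyGetD objects_contours 0 []) 0 []) 0 0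
  -- for i in range(len(...)): for point in ...[i]: if point[0] < min_coordinate: figure = i; min_coordinate = point[0]
  let st : Int × Int :=
    (PySem.List.pyRange 0 (PySem.List.len objects_contours)).foldl
      (fun (st : Int × Int) i =>
        (PySem.List.pyGetD objects_contours i []).foldl
          (fun (st : Int × Int) point =>
            if PySem.List.pyGetD point 0 0 < st.2 then (i, PySem.List.pyGetD point 0 0) else st)
          st)
      (0, min_coordinate)
  (PySem.List.pyGetD objects_contours st.1 [],
   PySem.List.slice objects_contours none (some st.1) ++
     PySem.List.slice objects_contours (some (st.1 + 1)) none)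

-- ===== PORT B =====
def classify_objects_alt (objects_contours : List (List (List Int))) : List (List Int) × List (List (List Int)) :=
  -- order = sorted((i for i, contour in enumerate(objects_contours) if contour),
  --                key=lambda i: min(point[0] for point in objects_contours[i]))
  let order : List Int :=
    PySem.List.sorted
      ((PySem.List.enumerate objects_contours).filterMap
        (fun ic => if ic.2.isEmpty then none else some ic.1))
      (fun i =>
        (PySem.List.min?
            ((PySem.List.pyGetD objects_contours i []).map (fun point => PySem.List.pyGetD point 0 0))
            (fun x => x)).getD 0)
  -- figure = order[0]  (Pre_ keeps order nonempty)
  let figure : Int := PySem.List.pyGetD order 0 0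
  (PySem.List.pyGetD objects_contours figure [],
   PySem.List.slice objects_contours none (some figure) ++
     PySem.List.slice objects_contours (some (figure + 1)) none)

-- ===== PRECONDITION & SPEC =====
-- Pre_ excludes exactly the inputs where the Python A raises IndexError: an empty outer list or an
-- empty first contour (objects_contours[0][0] fails) or any empty point (point[0] fails).
def Pre_classify_objects (objects_contours : List (List (List Int))) : Prop :=
  objects_contours ≠ [] ∧ objects_contours.headD [] ≠ [] ∧
    ∀ c ∈ objects_contours, ∀ p ∈ c, p ≠ []
instance (objects_contours : List (List (List Int))) : Decidable (Pre_classify_objects objects_contours) := by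
  unfold Pre_classify_objects; infer_instance
def pvWitness_classify_objects : List (List (List Int)) := [[[0]]]

def Spec_classify_objects (objects_contours : List (List (List Int))) (out : List (List Int) × List (List (List Int))) : Prop := out = classify_objects_alt objects_contours
instance (objects_contours : List (List (List Int))) (out : List (List Int) × List (List (List Int))) : Decidable (Spec_classify_objects objects_contours out) := by unfold Spec_classify_objects; infer_instance

-- ===== CLAIM (what is proved, stated in full; the proofs are below) =====
def Claim_equal_classify_objects : Prop := ∀ (objects_contours : List (List (List Int))), Dom_classify_objects objects_contours → Pre_classify_objects objects_contours → Spec_classify_objects objects_contours (classify_objects objects_contours)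

-- ===== LEMMAS AND PROOFS =====

-- A's outer-loop body, as a step over an (index, contour) pair.
def astep (st : Int × Int) (p : Int × List (List Int)) : Int × Int :=
  p.2.foldl
    (fun (st : Int × Int) point =>
      if PySem.List.pyGetD point 0 0 < st.2 then (p.1, PySem.List.pyGetD point 0 0) else st)
    st

-- B's sort key: the minimum x-coordinate of contour i of oc.
def keyf (oc : List (List (List Int))) (i : Int) : Int :=
  (PySem.List.min?
      ((PySem.List.pyGetD oc i []).map (fun point => PySem.List.pyGetD point 0 0))
      (fun x => x)).getD 0

-- The first-minimum fold step (the body of PySem.List.min?) at key keyf.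
def hstep (oc : List (List (List Int))) (acc : Option Int) (i : Int) : Option Int :=
  match acc with
  | none => some i
  | some m => if keyf oc i < keyf oc m then some i else some m

lemma insertBy_head? {α κ : Type} [LinearOrder κ] (key : α → κ) (x : α) (ys : List α) :
    (PySem.List.insertBy (fun a b => decide (key a < key b)) x ys).head? =
      (match ys.head? with
       | none => some x
       | some m => if key x < key m then some x else some m) := by
  cases ys with
  | nil => rfl
  | cons y t => by_cases h : key x < key y <;> simp [PySem.List.insertBy, h]

lemma head?_foldl_insertBy {α κ : Type} [LinearOrder κ] (key : α → κ) (xs : List α) (acc : List α) :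
    (xs.foldl (fun acc x => PySem.List.insertBy (fun a b => decide (key a < key b)) x acc) acc).head? =
      xs.foldl
        (fun h x =>
          match h with
          | none => some x
          | some m => if key x < key m then some x else some m)
        acc.head? := by
  induction xs generalizing acc with
  | nil => rfl
  | cons x t ih =>
    rw [List.foldl_cons, List.foldl_cons, ih, insertBy_head?]

-- Head of the stable sort = the first element with minimal key.
lemma sorted_head?_eq_min? {α κ : Type} [LinearOrder κ] (xs : List α) (key : α → κ) :
    (PySem.List.sorted xs key).head? = PySem.List.min? xs key := by
  rw [PySem.List.sorted_eq_foldl_insertBy, head?_foldl_insertBy]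
  rfl

lemma min?_keyf_eq_foldl_hstep (oc : List (List (List Int))) (xs : List Int) :
    PySem.List.min? xs (keyf oc) = xs.foldl (hstep oc) none := by
  unfold PySem.List.min?
  congr 1
  funext acc x
  cases acc <;> rfl

lemma foldl_min_shift (t : List Int) (a b : Int) :
    t.foldl min (min a b) = min a (t.foldl min b) := by
  induction t generalizing b with
  | nil => rfl
  | cons x t ih => simpa [min_assoc] using ih (min b x)

-- A's inner loop over one contour is a running minimum of the x-coordinates that records index i on a strict drop.
lemma runmin (c : List (List Int)) (i f m : Int) :
    c.foldl (fun (st : Int × Int) point =>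
        if PySem.List.pyGetD point 0 0 < st.2 then (i, PySem.List.pyGetD point 0 0) else st) (f, m)
      = (if (c.map (fun p => PySem.List.pyGetD p 0 0)).foldl min m < m then i else f,
         (c.map (fun p => PySem.List.pyGetD p 0 0)).foldl min m) := by
  induction c generalizing f m with
  | nil => simp
  | cons x t ih =>
    by_cases hx : PySem.List.pyGetD x 0 0 < m
    · have hmx : min m (PySem.List.pyGetD x 0 0) = PySem.List.pyGetD x 0 0 :=
        min_eq_right (le_of_lt hx)
      have hle := (PySem.List.foldl_min_le (t.map (fun p => PySem.List.pyGetD p 0 0))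
        (PySem.List.pyGetD x 0 0)).1
      simp only [List.foldl_cons, List.map_cons, if_pos hx, hmx, ih]
      have : (t.map (fun p => PySem.List.pyGetD p 0 0)).foldl min (PySem.List.pyGetD x 0 0) < m :=
        lt_of_le_of_lt hle hx
      simp [this]
    · have hmx : min m (PySem.List.pyGetD x 0 0) = m := min_eq_left (not_lt.1 hx)
      simp only [List.foldl_cons, List.map_cons, if_neg hx, hmx, ih]

-- The per-contour minimum of x-coordinates of a nonempty contour.
def cminOf (c : List (List Int)) : Int :=
  match c with
  | [] => 0
  | x :: t => (t.map (fun p => PySem.List.pyGetD p 0 0)).foldl min (PySem.List.pyGetD x 0 0)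

-- Core invariant: B's first-minimum fold over the nonempty indices of a tail of contour pairs,
-- seeded with the current best index fig (whose key is A's current running minimum m), tracks A's
-- running (fig, m) state, and A's running minimum stays the key of A's running index.
lemma outer (oc : List (List (List Int))) (l : List (Int × List (List Int))) (fig m : Int)
    (hm : keyf oc fig = m)
    (hkey : ∀ p ∈ l, p.2 ≠ [] → keyf oc p.1 = cminOf p.2) :
    (l.filterMap (fun ic => if ic.2.isEmpty then none else some ic.1)).foldl (hstep oc) (some fig)
        = some (l.foldl astep (fig, m)).1
      ∧ keyf oc (l.foldl astep (fig, m)).1 = (l.foldl astep (fig, m)).2 := by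
  induction l generalizing fig m with
  | nil => exact ⟨rfl, hm⟩
  | cons p l ih =>
    obtain ⟨i, c⟩ := p
    cases c with
    | nil =>
      have ha : astep (fig, m) (i, ([] : List (List Int))) = (fig, m) := rfl
      rw [List.filterMap_cons]
      simp only [List.isEmpty_nil, if_pos]
      rw [List.foldl_cons, ha]
      exact ih fig m hm (fun q hq => hkey q (List.mem_cons_of_mem _ hq))
    | cons x t =>
      set M : Int := (t.map (fun p => PySem.List.pyGetD p 0 0)).foldl min (PySem.List.pyGetD x 0 0) with hM
      have hki : keyf oc i = M := hkey (i, x :: t) (List.mem_cons_self) (by simp)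
      have hX : ((x :: t).map (fun p => PySem.List.pyGetD p 0 0)).foldl min m = min m M := by
        simp only [List.map_cons, List.foldl_cons]
        rw [foldl_min_shift, ← hM]
      have ha : astep (fig, m) (i, x :: t) = (if M < m then i else fig, min m M) := by
        show (x :: t).foldl
            (fun (st : Int × Int) point =>
              if PySem.List.pyGetD point 0 0 < st.2 then (i, PySem.List.pyGetD point 0 0) else st) (fig, m)
          = _
        rw [runmin, hX]
        have hcond : (min m M < m) ↔ (M < m) := by
          rcases le_total m M with h | h
          · rw [min_eq_left h]; omega
          · rw [min_eq_right h]
        simp only [hcond]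
      have hh : hstep oc (some fig) i = some (if M < m then i else fig) := by
        simp only [hstep, hki, hm]
        by_cases hMm : M < m
        · rw [if_pos hMm, if_pos hMm]
        · rw [if_neg hMm, if_neg hMm]
      rw [List.filterMap_cons]
      simp only [List.isEmpty_cons, if_neg Bool.false_ne_true]
      rw [List.foldl_cons, List.foldl_cons, ha, hh]
      by_cases hMm : M < m
      · rw [if_pos hMm, min_eq_right (le_of_lt hMm)]
        exact ih i M hki (fun q hq => hkey q (List.mem_cons_of_mem _ hq))
      · rw [if_neg hMm]
        have hmin : min m M = m := min_eq_left (not_lt.1 hMm)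
        rw [hmin]
        exact ih fig m hm (fun q hq => hkey q (List.mem_cons_of_mem _ hq))

lemma pyGetD_cons_zero {α : Type} (x : α) (xs : List α) (d : α) :
    PySem.List.pyGetD (x :: xs) 0 d = x := by
  rw [PySem.List.pyGetD_eq_getElem _ d le_rfl (by simp)]
  simp

-- The two ports agree on every input whose first contour is nonempty.
lemma main_eq (p0 : List Int) (ps : List (List Int)) (rest : List (List (List Int))) :
    classify_objects ((p0 :: ps) :: rest) = classify_objects_alt ((p0 :: ps) :: rest) := by
  set oc : List (List (List Int)) := (p0 :: ps) :: rest with hoc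
  have hm0 : PySem.List.pyGetD (PySem.List.pyGetD (PySem.List.pyGetD oc 0 []) 0 []) 0 0
      = PySem.List.pyGetD p0 0 0 := by
    rw [hoc, pyGetD_cons_zero, pyGetD_cons_zero]
  set M0 : Int := (ps.map (fun p => PySem.List.pyGetD p 0 0)).foldl min (PySem.List.pyGetD p0 0 0) with hM0
  -- A's loop as a fold over enumerate
  have hA : (PySem.List.pyRange 0 (PySem.List.len oc)).foldl
      (fun (st : Int × Int) i =>
        (PySem.List.pyGetD oc i []).foldl
          (fun (st : Int × Int) point =>
            if PySem.List.pyGetD point 0 0 < st.2 then (i, PySem.List.pyGetD point 0 0) else st)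
          st)
      (0, PySem.List.pyGetD p0 0 0)
      = (PySem.List.enumerate oc).foldl astep (0, PySem.List.pyGetD p0 0 0) := by
    rw [PySem.List.enumerate_eq_map_pyRange oc ([] : List (List Int)), List.foldl_map]
    rfl
  -- first step of A's loop
  have hstep0 : astep (0, PySem.List.pyGetD p0 0 0) ((0 : Int), p0 :: ps) = (0, M0) := by
    show (p0 :: ps).foldl
        (fun (st : Int × Int) point =>
          if PySem.List.pyGetD point 0 0 < st.2 then ((0 : Int), PySem.List.pyGetD point 0 0) else st)
        (0, PySem.List.pyGetD p0 0 0) = _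
    rw [runmin]
    simp only [List.map_cons, List.foldl_cons, min_self, ← hM0, ite_self]
  have hk0 : keyf oc 0 = M0 := by
    rw [keyf, hoc, pyGetD_cons_zero]
    simp only [List.map_cons]
    rw [PySem.List.min?_id_cons]
    rfl
  have henum : PySem.List.enumerate oc = ((0 : Int), p0 :: ps) :: PySem.List.enumerate rest 1 := by
    rw [hoc, PySem.List.enumerate_cons]; norm_num
  have hkey : ∀ p ∈ PySem.List.enumerate rest 1, p.2 ≠ [] → keyf oc p.1 = cminOf p.2 := by
    intro p hp hne
    rcases (PySem.List.mem_enumerate_iff rest 1 p).1 hp with ⟨k, hk, rfl⟩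
    have hcast : (1 : Int) + (k : Int) = ((k + 1 : Nat) : Int) := by push_cast; ring
    have hget : PySem.List.pyGetD oc ((1 : Int) + (k : Int)) [] = rest[k] := by
      rw [hcast, PySem.List.pyGetD_natCast, hoc]
      simp [List.getD_eq_getElem?_getD, hk]
    rw [keyf]
    show (PySem.List.min? ((PySem.List.pyGetD oc ((1 : Int) + (k : Int)) []).map _) _).getD 0 = _
    rw [hget]
    cases hrk : rest[k] with
    | nil => exact absurd hrk hne
    | cons x t =>
      simp only [List.map_cons]
      rw [PySem.List.min?_id_cons]
      rfl
  have houter := outer oc (PySem.List.enumerate rest 1) 0 M0 hk0 hkey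
  -- assemble
  show (PySem.List.pyGetD oc _ [], _) = (PySem.List.pyGetD oc _ [], _)
  rw [hm0, hA, henum, List.foldl_cons, hstep0]
  -- B's figure
  have hidxs : (PySem.List.enumerate oc).filterMap
      (fun ic => if ic.2.isEmpty then none else some ic.1)
      = (0 : Int) :: (PySem.List.enumerate rest 1).filterMap
          (fun ic => if ic.2.isEmpty then none else some ic.1) := by
    rw [henum, List.filterMap_cons]
    simp
  have hB : PySem.List.pyGetD
      (PySem.List.sorted
        ((PySem.List.enumerate oc).filterMap (fun ic => if ic.2.isEmpty then none else some ic.1))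
        (fun i =>
          (PySem.List.min?
              ((PySem.List.pyGetD oc i []).map (fun point => PySem.List.pyGetD point 0 0))
              (fun x => x)).getD 0)) 0 0
      = ((PySem.List.enumerate rest 1).foldl astep (0, M0)).1 := by
    have hkeyfun : (fun i =>
        (PySem.List.min?
            ((PySem.List.pyGetD oc i []).map (fun point => PySem.List.pyGetD point 0 0))
            (fun x => x)).getD 0) = keyf oc := rfl
    have hhead : (PySem.List.sorted
        ((PySem.List.enumerate oc).filterMap (fun ic => if ic.2.isEmpty then none else some ic.1))
        (keyf oc)).head? = some ((PySem.List.enumerate rest 1).foldl astep (0, M0)).1 := by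
      rw [sorted_head?_eq_min?, min?_keyf_eq_foldl_hstep, hidxs, List.foldl_cons]
      show List.foldl (hstep oc) (some 0) _ = _
      exact houter.1
    rw [hkeyfun]
    cases hs : (PySem.List.sorted
        ((PySem.List.enumerate oc).filterMap (fun ic => if ic.2.isEmpty then none else some ic.1))
        (keyf oc)) with
    | nil => rw [hs] at hhead; exact absurd hhead (by simp)
    | cons h t =>
      rw [hs] at hhead
      simp only [List.head?_cons, Option.some.injEq] at hhead
      rw [pyGetD_cons_zero, hhead]
  rw [← hB]
  rfl

-- ===== VERDICT (by name: the statement is the Claim_ definition above) =====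
theorem classify_objects_spec : Claim_equal_classify_objects := by
  intro oc _ hpre
  obtain ⟨h1, h2, _⟩ := hpre
  unfold Spec_classify_objects
  match oc, h1, h2 with
  | (p0 :: ps) :: rest, _, _ => exact main_eq p0 ps rest
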